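-- pv_equiv track=rewrite | github.com/kunavamshi/gfg-potd | Difficulty: Hard/Sum-string/sumstring.py | isSumString
-- ===== SOURCE A (Python) =====
-- def isSumString(s: str) -> bool:
--     # Helper to check if string has valid number format
--     def isValid(num):
--         return not (len(num) > 1 and num[0] == '0')
--
--     # Recursive function to check if remaining string matches the sum condition
--     def check(s, num1, num2):
--         if not isValid(num1) or not isValid(num2):
--             return False
--
--         sum_str = str(int(num1) + int(num2))
--         if not s.startswith(sum_str):
--             return False
--         if len(s) == len(sum_str):
--             return True
--         return check(s[len(sum_str):], num2, sum_str)
--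
--     n = len(s)
--     # Try all combinations for first and second numbers
--     for i in range(1, n):
--         for j in range(1, n - i):
--             num1 = s[0:i]
--             num2 = s[i:i + j]
--             if check(s[i + j:], num1, num2):
--                 return True
--     return False
-- ===== SOURCE B (Python) =====
-- def isSumString(s: str) -> bool:
--     # Generate-and-compare: for each seed split, generate the fib-like sum
--     # string until it reaches the length of the remainder, then compare once.
--     n = len(s)
--     for i in range(1, n):
--         a = s[:i]
--         if len(a) > 1 and a[0] == '0':
--             continue
--         for j in range(1, n - i):
--             b = s[i:i + j]
--             if len(b) > 1 and b[0] == '0':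
--                 continue
--             rest = s[i + j:]
--             parts = []
--             total = 0
--             x, y = a, b
--             while total < len(rest):
--                 c = str(int(x) + int(y))
--                 parts.append(c)
--                 total += len(c)
--                 x, y = y, c
--             if ''.join(parts) == rest:
--                 return True
--     return False
-- ===== Notes on version B (the rewrite author's own statement) =====
-- stated objective: alternative
-- what changed: The recursive prefix-consuming check helper is replaced by generate-and-compare: for each seed split the Fibonacci-like sum string is generated iteratively until it reaches the remainder's length and compared once, with leading-zero validation hoisted out of the verification (seed a validated once per i, before the inner loop).
-- outside the precondition, e.g. on isSumString('12x'): A returns False, B returns False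
import Mathlib
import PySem

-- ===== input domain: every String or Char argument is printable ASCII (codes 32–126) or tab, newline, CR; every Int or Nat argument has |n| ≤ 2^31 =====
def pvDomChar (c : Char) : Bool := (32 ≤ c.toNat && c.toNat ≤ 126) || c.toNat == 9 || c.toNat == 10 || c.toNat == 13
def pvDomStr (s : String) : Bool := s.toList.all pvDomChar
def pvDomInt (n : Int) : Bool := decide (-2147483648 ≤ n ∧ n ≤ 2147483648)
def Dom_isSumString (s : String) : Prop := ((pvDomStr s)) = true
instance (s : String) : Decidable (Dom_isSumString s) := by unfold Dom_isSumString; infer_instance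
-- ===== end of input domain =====

-- B replaces A's recursive prefix-consuming `check` by an iterative generate-and-compare
-- verifier with leading-zero validation hoisted to the seeds; same asymptotic cost ("alternative").

-- helper used by both ports' termination proofs: str(v) is never the empty string
def pvRep (n : Nat) : List Char :=
  if n < 10 then [Nat.digitChar n]
  else pvRep (n / 10) ++ [Nat.digitChar (n % 10)]
termination_by n
decreasing_by exact Nat.div_lt_self (by omega) (by omega)

lemma pvRep_ne_nil (n : Nat) : pvRep n ≠ [] := by
  rw [pvRep]; split <;> simp

lemma pvToDigitsCore_eq_rep : ∀ (f n : Nat) (ds : List Char), n < f →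
    Nat.toDigitsCore 10 f n ds = pvRep n ++ ds := by
  intro f
  induction f with
  | zero => omega
  | succ f ih =>
    intro n ds h
    rw [Nat.toDigitsCore]
    by_cases h0 : n / 10 = 0
    · have hn : n < 10 := by omega
      simp only [h0, if_true]
      conv_rhs => rw [pvRep]
      simp [hn, Nat.mod_eq_of_lt hn]
    · have hn : ¬ n < 10 := by
        intro hlt; exact h0 (Nat.div_eq_of_lt hlt)
      simp only [h0, if_false]
      rw [ih (n / 10) _ (by
        have : n / 10 < n := Nat.div_lt_self (by omega) (by omega)
        omega)]
      conv_rhs => rw [pvRep]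
      simp [hn, List.append_assoc]

lemma pvToChars_eq (v : Int) :
    PySem.Int.toChars v =
      if v < 0 then '-' :: pvRep v.natAbs else pvRep v.toNat := by
  rw [PySem.Int.toChars]
  unfold Nat.toDigits
  split <;> rw [pvToDigitsCore_eq_rep _ _ _ (by omega)] <;> simp

lemma pvToChars_ne_nil (v : Int) : PySem.Int.toChars v ≠ [] := by
  rw [pvToChars_eq]; split
  · simp
  · exact pvRep_ne_nil _

-- ===== PORT A =====
def pvIsValid (num : List Char) : Bool :=
  !(decide (num.length > 1) && (PySem.List.pyGet? num 0 == some '0'))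

def pvCheck (rest num1 num2 : List Char) : Bool :=
  if !(pvIsValid num1) || !(pvIsValid num2) then false
  else
    let ss := PySem.Int.toChars
      ((PySem.Int.ofChars? num1).getD 0 + (PySem.Int.ofChars? num2).getD 0)
    if h1 : !(PySem.Chars.startswith rest ss) then false
    else if h2 : rest.length = ss.length then true
    else pvCheck (PySem.List.slice rest (some (ss.length : Int)) none) num2 ss
termination_by rest.length
decreasing_by
  rw [PySem.List.slice_from _ (by exact_mod_cast Int.natCast_nonneg _)]
  have hpre : (PySem.Int.toChars
      ((PySem.Int.ofChars? num1).getD 0 + (PySem.Int.ofChars? num2).getD 0)) <+: rest :=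
    (PySem.Chars.startswith_iff _ _).mp (by simpa using h1)
  have hle := hpre.length_le
  have hpos : 0 < (PySem.Int.toChars
      ((PySem.Int.ofChars? num1).getD 0 + (PySem.Int.ofChars? num2).getD 0)).length :=
    List.length_pos_iff.mpr (pvToChars_ne_nil _)
  simp only [List.length_drop, Int.toNat_natCast]
  omega

def isSumString (s : String) : Bool :=
  let cs := s.toList
  let n := cs.length
  (PySem.List.pyRange 1 (n : Int)).any fun i =>
    (PySem.List.pyRange 1 ((n : Int) - i)).any fun j =>
      pvCheck (PySem.List.slice cs (some (i + j)) none)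
              (PySem.List.slice cs (some 0) (some i))
              (PySem.List.slice cs (some i) (some (i + j)))

-- ===== PORT B =====
def pvGrow (need : Nat) (x y : List Char) : List Char :=
  if _h : need = 0 then []
  else
    let c := PySem.Int.toChars
      ((PySem.Int.ofChars? x).getD 0 + (PySem.Int.ofChars? y).getD 0)
    c ++ pvGrow (need - c.length) y c
termination_by need
decreasing_by
  have hpos : 0 < (PySem.Int.toChars
      ((PySem.Int.ofChars? x).getD 0 + (PySem.Int.ofChars? y).getD 0)).length :=
    List.length_pos_iff.mpr (pvToChars_ne_nil _)
  omega

def isSumString_alt (s : String) : Bool :=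
  let cs := s.toList
  let n := cs.length
  (PySem.List.pyRange 1 (n : Int)).any fun i =>
    let a := PySem.List.slice cs none (some i)
    if decide (a.length > 1) && (PySem.List.pyGet? a 0 == some '0') then false
    else
      (PySem.List.pyRange 1 ((n : Int) - i)).any fun j =>
        let b := PySem.List.slice cs (some i) (some (i + j))
        if decide (b.length > 1) && (PySem.List.pyGet? b 0 == some '0') then false
        else
          let rest := PySem.List.slice cs (some (i + j)) none
          pvGrow rest.length a b == rest

-- ===== PRECONDITION & SPEC =====
-- Pre_ excludes strings of length ≥ 3 containing a non-digit character: on those the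
-- Python A (and B alike) in general raises ValueError from int(); on the few that return
-- before reaching an unparsable slice both programs agree anyway (see cites).
def Pre_isSumString (s : String) : Prop :=
  s.toList.all (fun c => c.isDigit) = true ∨ s.toList.length ≤ 2
instance (s : String) : Decidable (Pre_isSumString s) := by unfold Pre_isSumString; infer_instance

def pvWitness_isSumString : String := "112"

def Spec_isSumString (s : String) (out : Bool) : Prop := out = isSumString_alt s
instance (s : String) (out : Bool) : Decidable (Spec_isSumString s out) := by unfold Spec_isSumString; infer_instance

-- ===== CLAIM (what is proved, stated in full; the proofs are below) =====
def Claim_equal_isSumString : Prop := ∀ (s : String), Dom_isSumString s → Pre_isSumString s → Spec_isSumString s (isSumString s)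

-- ===== LEMMAS AND PROOFS =====

lemma pvRep_head_ne_zero : ∀ n, 1 ≤ n → ∀ c, (pvRep n).head? = some c → c ≠ '0' := by
  intro n
  induction n using Nat.strong_induction_on with
  | _ n ih =>
    intro h1 c hc
    rw [pvRep] at hc
    by_cases hn : n < 10
    · simp only [hn, if_true, List.head?_cons, Option.some.injEq] at hc
      subst hc
      interval_cases n <;> decide
    · simp only [hn, if_false] at hc
      rw [List.head?_append_of_ne_nil _ (pvRep_ne_nil _)] at hc
      exact ih (n / 10) (Nat.div_lt_self (by omega) (by omega))
        (by omega) c hc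

lemma pvIsValid_toChars (v : Int) : pvIsValid (PySem.Int.toChars v) = true := by
  unfold pvIsValid
  rw [pvToChars_eq]
  split
  · simp [pysem]
  · rcases hr : pvRep v.toNat with _ | ⟨c, tl⟩
    · exact absurd hr (pvRep_ne_nil _)
    · rcases Nat.eq_zero_or_pos v.toNat with h0 | h1
      · rw [h0, pvRep] at hr
        simp at hr
        rw [hr.2]
        simp [pysem]
      · have hc : c ≠ '0' := pvRep_head_ne_zero v.toNat h1 c (by rw [hr]; rfl)
        cases tl with
        | nil => simp [pysem]
        | cons d tl => simp [pysem, hc]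

lemma pvCheck_eq_grow_fuel : ∀ (N : Nat) (rest a b : List Char), rest.length ≤ N →
    rest ≠ [] → pvIsValid a = true → pvIsValid b = true →
    pvCheck rest a b = (pvGrow rest.length a b == rest) := by
  intro N
  induction N with
  | zero =>
    intro rest a b hN hr _ _
    exact absurd (List.length_eq_zero_iff.mp (by omega)) hr
  | succ N ih =>
    intro rest a b hN hr ha hb
    have hrlen : rest.length ≠ 0 := fun h => hr (List.length_eq_zero_iff.mp h)
    rw [pvCheck, pvGrow]
    simp only [ha, hb, Bool.not_true, Bool.or_self, Bool.false_eq_true, if_false, dif_neg hrlen]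
    set ss := PySem.Int.toChars
        ((PySem.Int.ofChars? a).getD 0 + (PySem.Int.ofChars? b).getD 0) with hss
    have hssne : ss ≠ [] := pvToChars_ne_nil _
    have hsspos : 0 < ss.length := List.length_pos_iff.mpr hssne
    by_cases hs : PySem.Chars.startswith rest ss
    · have hpre : ss <+: rest := (PySem.Chars.startswith_iff _ _).mp hs
      have hle := hpre.length_le
      have hdrop : ss ++ rest.drop ss.length = rest := List.prefix_iff_eq_append.mp hpre
      simp only [hs, Bool.not_true, Bool.false_eq_true, dite_eq_ite, if_false]
      by_cases hlen : rest.length = ss.length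
      · simp only [hlen, if_true]
        have hrs : rest = ss := (hpre.eq_of_length hlen.symm).symm
        subst hrs
        rw [Nat.sub_self, pvGrow]
        simp
      · simp only [hlen, if_false]
        have hlt : ss.length < rest.length := by omega
        have hr' : rest.drop ss.length ≠ [] := by
          intro h
          have := congrArg List.length h
          simp only [List.length_drop, List.length_nil] at this
          omega
        rw [PySem.List.slice_from _ (by exact_mod_cast Int.natCast_nonneg _)]
        simp only [Int.toNat_natCast]
        rw [ih (rest.drop ss.length) b ss (by simp only [List.length_drop]; omega)
            hr' hb (pvIsValid_toChars _)]
        have hdl : (rest.drop ss.length).length = rest.length - ss.length := by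
          simp only [List.length_drop]
        rw [hdl]
        rcases Decidable.em (pvGrow (rest.length - ss.length) b ss = rest.drop ss.length) with he | he
        · rw [beq_iff_eq.mpr he, Bool.true_eq]
          rw [beq_iff_eq]
          rw [he]
          exact hdrop
        · have hne2 : ¬ (ss ++ pvGrow (rest.length - ss.length) b ss = rest) := by
            intro hcontra
            exact he (List.append_cancel_left (hcontra.trans hdrop.symm))
          rw [beq_eq_false_iff_ne.mpr he, beq_eq_false_iff_ne.mpr hne2]
    · simp only [hs, Bool.not_false, dite_eq_ite, if_true]
      have hne2 : ¬ (ss ++ pvGrow (rest.length - ss.length) b ss = rest) := by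
        intro hcontra
        exact hs ((PySem.Chars.startswith_iff _ _).mpr ⟨_, hcontra⟩)
      rw [beq_eq_false_iff_ne.mpr hne2]

lemma pvSlice_zero_eq_none {α : Type} (cs : List α) (i : Int) (hi : 0 ≤ i) :
    PySem.List.slice cs (some 0) (some i) = PySem.List.slice cs none (some i) := by
  obtain ⟨m, rfl⟩ := Int.eq_ofNat_of_zero_le hi
  rw [PySem.List.slice_to _ (by exact_mod_cast Int.natCast_nonneg _)]
  have h0 : (0 : Int) = ((0 : Nat) : Int) := rfl
  rw [h0, PySem.List.slice_natCast]
  simp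

-- ===== VERDICT (by name: the statement is the Claim_ definition above) =====
theorem isSumString_spec : Claim_equal_isSumString := by
  unfold Claim_equal_isSumString
  intro s _hdom _hpre
  unfold Spec_isSumString
  unfold isSumString isSumString_alt
  apply Eq.symm
  apply PySem.List.any_congr_mem
  intro i hi
  rw [PySem.List.mem_pyRange_one] at hi
  have hi1 : 1 ≤ i := hi.1
  have hin : i < (s.toList.length : Int) := hi.2
  rw [pvSlice_zero_eq_none s.toList i (by omega)]
  set a := PySem.List.slice s.toList none (some i) with hadef
  by_cases hga : (decide (a.length > 1) && (PySem.List.pyGet? a 0 == some '0')) = true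
  · -- seed a invalid: B short-circuits, every pvCheck is false
    simp only [hga, if_true]
    have hva : pvIsValid a = false := by
      unfold pvIsValid; rw [hga]; rfl
    apply Eq.symm
    apply List.any_eq_false.mpr
    intro j _
    rw [pvCheck]
    simp [hva]
  · simp only [hga]
    have hva : pvIsValid a = true := by
      unfold pvIsValid
      rw [Bool.not_eq_true] at hga
      rw [hga]
      rfl
    apply PySem.List.any_congr_mem
    intro j hj
    rw [PySem.List.mem_pyRange_one] at hj
    set b := PySem.List.slice s.toList (some i) (some (i + j)) with hbdef
    by_cases hgb : (decide (b.length > 1) && (PySem.List.pyGet? b 0 == some '0')) = true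
    · simp only [hgb, if_true]
      have hvb : pvIsValid b = false := by
        unfold pvIsValid; rw [hgb]; rfl
      rw [pvCheck]
      simp [hvb]
    · simp only [hgb]
      have hvb : pvIsValid b = true := by
        unfold pvIsValid
        rw [Bool.not_eq_true] at hgb
        rw [hgb]
        rfl
      have hrest : PySem.List.slice s.toList (some (i + j)) none ≠ [] := by
        rw [PySem.List.slice_from _ (by omega)]
        intro h
        have := congrArg List.length h
        simp only [List.length_drop, List.length_nil] at this
        omega
      exact (pvCheck_eq_grow_fuel _ _ a b le_rfl hrest hva hvb).symm
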